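-- pv_equiv track=rewrite | github.com/franciszver/GChallenges | Challenges/xordonQueue.py | altSolution
-- ===== SOURCE A (Python) =====
-- def range(a):
--     range = (a, 1, a+1, 0)[a % 4]
--     return range
--
-- def getXorBetweenTwoNumberRanges(a, b):
--     return range(b)^range(a-1)
--
-- def altSolution(start, length):
--     totalSteps = 0
--     l = length
--     ans = 0
--     while l > 0:
--         l = l-1
--         ans^=getXorBetweenTwoNumberRanges(start, start+l)
--         start += length
--         totalSteps+=1
--     return ans, totalSteps
-- ===== SOURCE B (Python) =====
-- # Period-4 grouping: XOR of prefix-xor values over the two arithmetic chains of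
-- # endpoints, handled per residue class mod 4 (classes 1 and 3 in O(1), classes 0
-- # and 2 by a tight loop over the raw values), instead of A's per-step helper calls.
--
-- def _xor_px_ap(a, d, m):
--     # XOR of px(a + k*d) for k in 0..m-1, where px(n) = (n, 1, n+1, 0)[n % 4]
--     # is the prefix XOR 0^1^...^n.  Requires d >= 1, m >= 1.
--     p = 4 if d % 2 else (2 if d % 4 else 1)  # period of (a + k*d) % 4 in k
--     total = 0
--     for j in range(p):
--         cnt = (m - j + p - 1) // p           # size of residue class k = j (mod p)
--         if cnt <= 0:
--             continue
--         r = (a + j * d) % 4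
--         if r == 3:
--             continue                          # px = 0 on this whole class
--         if r == 1:
--             total ^= cnt & 1                  # px = 1 on this whole class
--         else:
--             first = a + j * d + (1 if r == 2 else 0)
--             step = p * d
--             v = 0
--             for x in range(first, first + cnt * step, step):
--                 v ^= x
--             total ^= v
--     return total
--
--
-- def altSolution(start, length):
--     if length <= 0:
--         return 0, 0
--     if length == 1:
--         return start, 1
--     ans = _xor_px_ap(start + length - 1, length - 1, length) \
--         ^ _xor_px_ap(start - 1, length, length)
--     return ans, length
-- ===== Notes on version B (the rewrite author's own statement) =====
-- stated objective: faster
-- what changed: B groups the 2*length prefix-XOR endpoint terms into arithmetic progressions by residue mod 4: classes with residue 3 vanish, residue-1 classes reduce to a count parity in O(1), and residues 0/2 are XOR-ed as raw values in a tight range() loop, replacing A's per-step helper calls with mutating start/l state.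
import Mathlib
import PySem

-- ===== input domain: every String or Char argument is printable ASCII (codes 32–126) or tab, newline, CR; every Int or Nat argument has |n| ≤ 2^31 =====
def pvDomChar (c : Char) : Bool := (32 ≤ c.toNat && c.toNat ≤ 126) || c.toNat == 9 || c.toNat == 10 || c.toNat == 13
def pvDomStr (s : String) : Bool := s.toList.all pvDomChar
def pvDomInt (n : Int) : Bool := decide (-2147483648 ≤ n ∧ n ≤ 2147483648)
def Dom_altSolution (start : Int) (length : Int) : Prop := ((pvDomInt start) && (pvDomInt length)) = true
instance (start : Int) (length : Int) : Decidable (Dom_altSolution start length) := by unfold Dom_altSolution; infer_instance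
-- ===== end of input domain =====

-- B replaces A's per-step helper calls by period-4 grouping of the XOR-range endpoint
-- terms into arithmetic progressions (a constant-factor speedup, same O(length)).

-- ===== PORT A =====
-- `range(a) = (a, 1, a+1, 0)[a % 4]`; the index a % 4 is always in [0, 4), so pyGet? is
-- never none and the .getD 0 default is unreachable.
def rangeA (a : Int) : Int :=
  (PySem.List.pyGet? ([a, 1, a + 1, 0] : List Int) (PySem.Int.mod a 4)).getD 0

def getXorBetweenTwoNumberRanges (a b : Int) : Int :=
  PySem.Int.bxor (rangeA b) (rangeA (a - 1))

-- the `while l > 0` loop; state (start, l, ans, totalSteps), `length` is the fixed parameter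
def altLoopA (length start l ans totalSteps : Int) : Int × Int :=
  if 0 < l then
    altLoopA length (start + length) (l - 1)
      (PySem.Int.bxor ans (getXorBetweenTwoNumberRanges start (start + (l - 1))))
      (totalSteps + 1)
  else (ans, totalSteps)
termination_by l.toNat
decreasing_by omega

def altSolution (start : Int) (length : Int) : Int × Int :=
  altLoopA length start length 0 0

-- ===== PORT B =====
-- XOR of px(a + k*d) for k in 0..m-1 (px = prefix-XOR closed form), grouped by the
-- residue class of the point mod 4, which is periodic in k with period p | 4.
def xorPxAp (a d m : Int) : Int :=
  let p : Int := if PySem.Int.mod d 2 ≠ 0 then 4 else if PySem.Int.mod d 4 ≠ 0 then 2 else 1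
  (PySem.List.pyRange 0 p 1).foldl (fun total j =>
    let cnt := PySem.Int.floordiv (m - j + p - 1) p
    if cnt ≤ 0 then total
    else
      let r := PySem.Int.mod (a + j * d) 4
      if r = 3 then total
      else if r = 1 then PySem.Int.bxor total (PySem.Int.band cnt 1)
      else
        let first := a + j * d + (if r = 2 then 1 else 0)
        let step := p * d
        PySem.Int.bxor total
          ((PySem.List.pyRange first (first + cnt * step) step).foldl
            (fun v x => PySem.Int.bxor v x) 0)) 0

def altSolution_alt (start : Int) (length : Int) : Int × Int :=
  if length ≤ 0 then (0, 0)
  else if length = 1 then (start, 1)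
  else
    (PySem.Int.bxor (xorPxAp (start + length - 1) (length - 1) length)
       (xorPxAp (start - 1) length length),
     length)

-- ===== PRECONDITION & SPEC =====
def Spec_altSolution (start : Int) (length : Int) (out : Int × Int) : Prop := out = altSolution_alt start length
instance (start : Int) (length : Int) (out : Int × Int) : Decidable (Spec_altSolution start length out) := by unfold Spec_altSolution; infer_instance

-- ===== CLAIM (what is proved, stated in full; the proofs are below) =====
def Claim_equal_altSolution : Prop := ∀ (start : Int) (length : Int), Dom_altSolution start length → Spec_altSolution start length (altSolution start length)

-- ===== LEMMAS AND PROOFS =====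

-- prefix XOR 0^1^...^n in closed form (what A's `range` helper computes)
def px (n : Int) : Int :=
  if PySem.Int.mod n 4 = 0 then n
  else if PySem.Int.mod n 4 = 1 then 1
  else if PySem.Int.mod n 4 = 2 then n + 1
  else 0

-- XOR of f 0, ..., f (n-1)
def xorRange (f : Nat → Int) (n : Nat) : Int :=
  (List.range n).foldl (fun acc k => PySem.Int.bxor acc (f k)) 0

def enc (s : Bool) (m : Nat) : Int := if s then -(m : Int) - 1 else (m : Int)
theorem bxor_enc (s1 s2 : Bool) (m1 m2 : Nat) :
    PySem.Int.bxor (enc s1 m1) (enc s2 m2) = enc (xor s1 s2) (m1 ^^^ m2) := by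
  cases s1 <;> cases s2 <;> simp [enc, PySem.Int.bxor] <;> (first | rfl | omega)
theorem exists_enc (n : Int) : ∃ s m, n = enc s m := by
  by_cases h : 0 ≤ n
  · exact ⟨false, n.toNat, by simp [enc]; omega⟩
  · exact ⟨true, (-n - 1).toNat, by simp [enc]; omega⟩

theorem bxor_assoc (a b c : Int) :
    PySem.Int.bxor (PySem.Int.bxor a b) c = PySem.Int.bxor a (PySem.Int.bxor b c) := by
  obtain ⟨sa, ma, rfl⟩ := exists_enc a
  obtain ⟨sb, mb, rfl⟩ := exists_enc b
  obtain ⟨sc, mc, rfl⟩ := exists_enc c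
  simp [bxor_enc, Nat.xor_assoc]

theorem bxor_left_comm (a b c : Int) :
    PySem.Int.bxor a (PySem.Int.bxor b c) = PySem.Int.bxor b (PySem.Int.bxor a c) := by
  rw [← bxor_assoc, ← bxor_assoc, PySem.Int.bxor_comm a b]

theorem bxor_zero_left (a : Int) : PySem.Int.bxor 0 a = a := by
  rw [PySem.Int.bxor_comm]; exact PySem.Int.bxor_zero a

theorem nat_even_xor_one (k : Nat) : (2 * k) ^^^ 1 = 2 * k + 1 := by
  apply Nat.eq_of_testBit_eq
  intro i
  cases i with
  | zero => simp [Nat.testBit_zero]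
  | succ j => simp [Nat.testBit_succ]

theorem nat_odd_xor_one (k : Nat) : (2 * k + 1) ^^^ 1 = 2 * k := by
  rw [← nat_even_xor_one, Nat.xor_assoc, Nat.xor_self, Nat.xor_zero]

theorem bxor_one_even (n : Int) (h : n % 2 = 0) : PySem.Int.bxor n 1 = n + 1 := by
  obtain ⟨s, m, rfl⟩ := exists_enc n
  have h1 : (1 : Int) = enc false 1 := rfl
  rw [h1, bxor_enc]
  cases s <;> simp [enc] at h ⊢
  · obtain ⟨k, rfl⟩ : ∃ k, m = 2 * k := ⟨m / 2, by omega⟩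
    rw [nat_even_xor_one]; push_cast; ring
  · obtain ⟨k, rfl⟩ : ∃ k, m = 2 * k + 1 := ⟨m / 2, by omega⟩
    rw [nat_odd_xor_one]; push_cast; ring

theorem bxor_one_odd (n : Int) (h : n % 2 = 1) : PySem.Int.bxor n 1 = n - 1 := by
  obtain ⟨s, m, rfl⟩ := exists_enc n
  have h1 : (1 : Int) = enc false 1 := rfl
  rw [h1, bxor_enc]
  cases s <;> simp [enc] at h ⊢
  · obtain ⟨k, rfl⟩ : ∃ k, m = 2 * k + 1 := ⟨m / 2, by omega⟩
    rw [nat_odd_xor_one]; push_cast; ring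
  · obtain ⟨k, rfl⟩ : ∃ k, m = 2 * k := ⟨m / 2, by omega⟩
    rw [nat_even_xor_one]; push_cast; ring

theorem xorRange_succ (f : Nat → Int) (n : Nat) :
    xorRange f (n + 1) = PySem.Int.bxor (xorRange f n) (f n) := by
  simp [xorRange, List.range_succ]

theorem foldl_bxor_init (l : List Nat) (f : Nat → Int) (i : Int) :
    l.foldl (fun acc k => PySem.Int.bxor acc (f k)) i
      = PySem.Int.bxor i (l.foldl (fun acc k => PySem.Int.bxor acc (f k)) 0) := by
  induction l generalizing i with
  | nil => simp [PySem.Int.bxor_zero]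
  | cons x xs ih =>
    simp only [List.foldl_cons]
    rw [ih, ih (PySem.Int.bxor 0 (f x)), ← bxor_assoc, ← bxor_assoc,
      PySem.Int.bxor_zero i]

theorem xorRange_succ_left (f : Nat → Int) (n : Nat) :
    xorRange f (n + 1) = PySem.Int.bxor (f 0) (xorRange (fun k => f (k + 1)) n) := by
  simp only [xorRange, List.range_succ_eq_map, List.foldl_cons, List.foldl_map]
  rw [foldl_bxor_init, PySem.Int.bxor_comm 0 (f 0), PySem.Int.bxor_zero]

theorem xorRange_congr (f g : Nat → Int) (n : Nat) (h : ∀ k, k < n → f k = g k) :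
    xorRange f n = xorRange g n := by
  induction n with
  | zero => rfl
  | succ m ih =>
    rw [xorRange_succ, xorRange_succ, ih (fun k hk => h k (by omega)), h m (by omega)]

theorem rangeA_eq_px (a : Int) : rangeA a = px a := by
  have h0 : 0 ≤ PySem.Int.mod a 4 := PySem.Int.mod_nonneg a (by norm_num)
  have h4 : PySem.Int.mod a 4 < 4 := PySem.Int.mod_lt a (by norm_num)
  unfold rangeA px
  interval_cases h : PySem.Int.mod a 4 <;> simp [PySem.List.pyGet?, PySem.List.pyIdx?]

theorem altLoopA_spec (m : Nat) (length start ans steps : Int) :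
    altLoopA length start (m : Int) ans steps
      = (PySem.Int.bxor ans
          (xorRange (fun k => PySem.Int.bxor
              (px (start + (k : Int) * length + ((m : Int) - 1 - (k : Int))))
              (px (start + (k : Int) * length - 1))) m),
         steps + (m : Int)) := by
  induction m generalizing start ans steps with
  | zero =>
    rw [altLoopA]
    simp [xorRange]
  | succ n ih =>
    rw [altLoopA, if_pos (by exact_mod_cast Nat.succ_pos n)]
    have harg : ((n + 1 : Nat) : Int) - 1 = (n : Int) := by push_cast; ring
    rw [harg, ih]
    simp only [Prod.mk.injEq]
    refine ⟨?_, by push_cast; ring⟩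
    rw [xorRange_succ_left, bxor_assoc]
    congr 1
    congr 1
    · simp only [getXorBetweenTwoNumberRanges, rangeA_eq_px]
      congr 2 <;> push_cast <;> ring
    · refine xorRange_congr _ _ n (fun k hk => ?_)
      congr 2 <;> push_cast <;> ring

theorem xorRange_bxor_split (u v : Nat → Int) (n : Nat) :
    xorRange (fun k => PySem.Int.bxor (u k) (v k)) n
      = PySem.Int.bxor (xorRange u n) (xorRange v n) := by
  induction n with
  | zero => simp [xorRange]
  | succ m ih =>
    rw [xorRange_succ, xorRange_succ, xorRange_succ, ih]
    rw [bxor_assoc, bxor_assoc]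
    congr 1
    exact bxor_left_comm _ _ _

theorem inner_fold_eq (first step cnt : Int) (hs : 0 < step) (hc : 0 ≤ cnt) :
    (PySem.List.pyRange first (first + cnt * step) step).foldl
        (fun v x => PySem.Int.bxor v x) 0
      = xorRange (fun i => first + (i : Int) * step) cnt.toNat := by
  rw [PySem.List.pyRange_of_pos _ _ hs]
  rcases lt_or_ge 0 cnt with hpos | hz
  · rw [if_pos (by nlinarith)]
    have hN : ((first + cnt * step - first + step - 1) / step).toNat = cnt.toNat := by
      have h1 : first + cnt * step - first + step - 1 = (step - 1) + cnt * step := by ring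
      rw [h1, Int.add_mul_ediv_right _ _ (by omega), Int.ediv_eq_zero_of_lt (by omega) (by omega)]
      omega
    rw [hN]
    induction cnt.toNat with
    | zero => simp [xorRange]
    | succ n ih =>
      rw [List.range_succ, List.map_append, List.foldl_append, ih, xorRange_succ]
      simp [mul_comm]
  · have : cnt = 0 := by omega
    subst this
    rw [if_neg (by omega)]
    simp [xorRange]

theorem mod4_shift (c step : Int) (hst : (4:Int) ∣ step) (i : Nat) :
    PySem.Int.mod (c + (i : Int) * step) 4 = PySem.Int.mod c 4 := by
  obtain ⟨t, rfl⟩ := hst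
  rw [PySem.Int.mod_eq_emod_of_pos (by norm_num : (0:Int) < 4),
    PySem.Int.mod_eq_emod_of_pos (by norm_num : (0:Int) < 4)]
  have hd : (4:Int) ∣ (i : Int) * (4 * t) := ⟨(i : Int) * t, by ring⟩
  omega

theorem class_r0 (c step : Int) (hst : (4:Int) ∣ step) (hc : PySem.Int.mod c 4 = 0) (n : Nat) :
    xorRange (fun i => px (c + (i : Int) * step)) n = xorRange (fun i => c + (i : Int) * step) n := by
  refine xorRange_congr _ _ n (fun k _ => ?_)
  unfold px
  rw [mod4_shift c step hst k, hc]
  norm_num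

theorem class_r1 (c step : Int) (hst : (4:Int) ∣ step) (hc : PySem.Int.mod c 4 = 1) (n : Nat) :
    xorRange (fun i => px (c + (i : Int) * step)) n = if n % 2 = 1 then 1 else 0 := by
  have h1 : ∀ k : Nat, px (c + (k : Int) * step) = 1 := fun k => by
    unfold px
    rw [mod4_shift c step hst k, hc]
    norm_num
  induction n with
  | zero => simp [xorRange]
  | succ m ih =>
    rw [xorRange_succ, ih, h1]
    rcases Nat.mod_two_eq_zero_or_one m with he | ho
    · rw [if_neg (by omega), if_pos (by omega)]
      exact bxor_zero_left 1
    · rw [if_pos (by omega), if_neg (by omega)]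
      decide

theorem class_r2 (c step : Int) (hst : (4:Int) ∣ step) (hc : PySem.Int.mod c 4 = 2) (n : Nat) :
    xorRange (fun i => px (c + (i : Int) * step)) n
      = xorRange (fun i => (c + 1) + (i : Int) * step) n := by
  refine xorRange_congr _ _ n (fun k _ => ?_)
  unfold px
  rw [mod4_shift c step hst k, hc]
  norm_num
  ring

theorem class_r3 (c step : Int) (hst : (4:Int) ∣ step) (hc : PySem.Int.mod c 4 = 3) (n : Nat) :
    xorRange (fun i => px (c + (i : Int) * step)) n = 0 := by
  have h1 : ∀ k : Nat, px (c + (k : Int) * step) = 0 := fun k => by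
    unfold px
    rw [mod4_shift c step hst k, hc]
    norm_num
  induction n with
  | zero => simp [xorRange]
  | succ m ih =>
    rw [xorRange_succ, ih, h1]
    decide

theorem slot_eq (t c step cnt : Int) (hs : 0 < step) (hst : (4:Int) ∣ step) (hc : 0 ≤ cnt) :
    (if cnt ≤ 0 then t
     else
       if PySem.Int.mod c 4 = 3 then t
       else if PySem.Int.mod c 4 = 1 then PySem.Int.bxor t (PySem.Int.band cnt 1)
       else
         PySem.Int.bxor t
           ((PySem.List.pyRange (c + (if PySem.Int.mod c 4 = 2 then 1 else 0))
               (c + (if PySem.Int.mod c 4 = 2 then 1 else 0) + cnt * step) step).foldl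
             (fun v x => PySem.Int.bxor v x) 0))
      = PySem.Int.bxor t (xorRange (fun i => px (c + (i : Int) * step)) cnt.toNat) := by
  rcases eq_or_lt_of_le hc with h0 | hpos
  · rw [if_pos (by omega)]
    simp only [show cnt.toNat = 0 from by omega]
    simp [xorRange, PySem.Int.bxor_zero]
  · rw [if_neg (by omega)]
    have hr0 : 0 ≤ PySem.Int.mod c 4 := PySem.Int.mod_nonneg c (by norm_num)
    have hr4 : PySem.Int.mod c 4 < 4 := PySem.Int.mod_lt c (by norm_num)
    interval_cases h : PySem.Int.mod c 4
    · norm_num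
      rw [inner_fold_eq c step cnt hs hc, ← class_r0 c step hst h cnt.toNat]
    · norm_num
      rw [PySem.Int.band_one, class_r1 c step hst h cnt.toNat]
      congr 1
      rw [PySem.Int.mod_eq_emod_of_pos (by norm_num : (0:Int) < 2)]
      split_ifs <;> omega
    · norm_num
      rw [inner_fold_eq (c+1) step cnt hs hc, ← class_r2 c step hst h cnt.toNat]
    · norm_num
      rw [class_r3 c step hst h cnt.toNat, PySem.Int.bxor_zero]

theorem pull1 (a x b : Int) :
    PySem.Int.bxor (PySem.Int.bxor a x) b = PySem.Int.bxor (PySem.Int.bxor a b) x := by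
  rw [bxor_assoc, bxor_assoc, PySem.Int.bxor_comm x b]

theorem shape4 (a b c d x : Int) :
    PySem.Int.bxor (PySem.Int.bxor (PySem.Int.bxor (PySem.Int.bxor a b) c) d) x
      = PySem.Int.bxor (PySem.Int.bxor (PySem.Int.bxor a b) c) (PySem.Int.bxor d x) :=
  bxor_assoc _ _ _

theorem shape4_0 (a b c d x : Int) :
    PySem.Int.bxor (PySem.Int.bxor (PySem.Int.bxor (PySem.Int.bxor a b) c) d) x
      = PySem.Int.bxor (PySem.Int.bxor (PySem.Int.bxor (PySem.Int.bxor a x) b) c) d := by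
  simp only [bxor_assoc]
  simp [PySem.Int.bxor_comm, bxor_left_comm]

theorem shape4_1 (a b c d x : Int) :
    PySem.Int.bxor (PySem.Int.bxor (PySem.Int.bxor (PySem.Int.bxor a b) c) d) x
      = PySem.Int.bxor (PySem.Int.bxor (PySem.Int.bxor a (PySem.Int.bxor b x)) c) d := by
  simp only [bxor_assoc]
  simp [PySem.Int.bxor_comm, bxor_left_comm]

theorem shape4_2 (a b c d x : Int) :
    PySem.Int.bxor (PySem.Int.bxor (PySem.Int.bxor (PySem.Int.bxor a b) c) d) x
      = PySem.Int.bxor (PySem.Int.bxor (PySem.Int.bxor a b) (PySem.Int.bxor c x)) d := by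
  simp only [bxor_assoc]
  simp [PySem.Int.bxor_comm, bxor_left_comm]

theorem part2 (g : Nat → Int) (m : Nat) :
    xorRange g m
      = PySem.Int.bxor (xorRange (fun i => g (2 * i)) ((m + 1) / 2))
          (xorRange (fun i => g (1 + 2 * i)) (m / 2)) := by
  induction m with
  | zero => simp [xorRange]
  | succ n ih =>
    rw [xorRange_succ, ih]
    rcases Nat.mod_two_eq_zero_or_one n with he | ho
    · obtain ⟨q, rfl⟩ : ∃ q, n = 2 * q := ⟨n / 2, by omega⟩
      simp only [show (2*q + 1 + 1) / 2 = q + 1 from by omega,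
        show (2*q + 1) / 2 = q from by omega,
        show (2*q) / 2 = q from by omega]
      rw [xorRange_succ (fun i => g (2 * i)) q]
      exact pull1 _ _ _
    · obtain ⟨q, rfl⟩ : ∃ q, n = 2 * q + 1 := ⟨n / 2, by omega⟩
      simp only [show (2*q + 1 + 1 + 1) / 2 = q + 1 from by omega,
        show (2*q + 1 + 1) / 2 = q + 1 from by omega,
        show (2*q + 1) / 2 = q from by omega]
      rw [xorRange_succ (fun i => g (1 + 2 * i)) q,
        show g (1 + 2 * q) = g (2 * q + 1) from by congr 1; omega]
      exact bxor_assoc _ _ _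

theorem part4 (g : Nat → Int) (m : Nat) :
    xorRange g m
      = PySem.Int.bxor (PySem.Int.bxor (PySem.Int.bxor
          (xorRange (fun i => g (4 * i)) ((m + 3) / 4))
          (xorRange (fun i => g (1 + 4 * i)) ((m + 2) / 4)))
          (xorRange (fun i => g (2 + 4 * i)) ((m + 1) / 4)))
          (xorRange (fun i => g (3 + 4 * i)) (m / 4)) := by
  induction m with
  | zero => simp [xorRange]
  | succ n ih =>
    rw [xorRange_succ, ih]
    have h4 := Nat.mod_lt n (show 0 < 4 by norm_num)
    interval_cases hm : n % 4
    · obtain ⟨q, rfl⟩ : ∃ q, n = 4 * q := ⟨n / 4, by omega⟩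
      simp only [show (4*q + 1 + 3) / 4 = q + 1 from by omega,
        show (4*q + 1 + 2) / 4 = q from by omega,
        show (4*q + 1 + 1) / 4 = q from by omega,
        show (4*q + 1) / 4 = q from by omega,
        show (4*q + 3) / 4 = q from by omega,
        show (4*q + 2) / 4 = q from by omega,
        show (4*q) / 4 = q from by omega]
      rw [xorRange_succ (fun i => g (4 * i)) q]
      exact shape4_0 _ _ _ _ _
    · obtain ⟨q, rfl⟩ : ∃ q, n = 4 * q + 1 := ⟨n / 4, by omega⟩
      simp only [show (4*q + 1 + 1 + 3) / 4 = q + 1 from by omega,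
        show (4*q + 1 + 1 + 2) / 4 = q + 1 from by omega,
        show (4*q + 1 + 1 + 1) / 4 = q from by omega,
        show (4*q + 1 + 1) / 4 = q from by omega,
        show (4*q + 1 + 3) / 4 = q + 1 from by omega,
        show (4*q + 1 + 2) / 4 = q from by omega,
        show (4*q + 1) / 4 = q from by omega]
      rw [xorRange_succ (fun i => g (1 + 4 * i)) q,
        show g (1 + 4 * q) = g (4 * q + 1) from by congr 1; omega]
      exact shape4_1 _ _ _ _ _
    · obtain ⟨q, rfl⟩ : ∃ q, n = 4 * q + 2 := ⟨n / 4, by omega⟩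
      simp only [show (4*q + 2 + 1 + 3) / 4 = q + 1 from by omega,
        show (4*q + 2 + 1 + 2) / 4 = q + 1 from by omega,
        show (4*q + 2 + 1 + 1) / 4 = q + 1 from by omega,
        show (4*q + 2 + 1) / 4 = q from by omega,
        show (4*q + 2 + 3) / 4 = q + 1 from by omega,
        show (4*q + 2 + 2) / 4 = q + 1 from by omega,
        show (4*q + 2 + 1) / 4 = q from by omega,
        show (4*q + 2) / 4 = q from by omega]
      rw [xorRange_succ (fun i => g (2 + 4 * i)) q,
        show g (2 + 4 * q) = g (4 * q + 2) from by congr 1; omega]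
      exact shape4_2 _ _ _ _ _
    · obtain ⟨q, rfl⟩ : ∃ q, n = 4 * q + 3 := ⟨n / 4, by omega⟩
      simp only [show (4*q + 3 + 1 + 3) / 4 = q + 1 from by omega,
        show (4*q + 3 + 1 + 2) / 4 = q + 1 from by omega,
        show (4*q + 3 + 1 + 1) / 4 = q + 1 from by omega,
        show (4*q + 3 + 1) / 4 = q + 1 from by omega,
        show (4*q + 3 + 3) / 4 = q + 1 from by omega,
        show (4*q + 3 + 2) / 4 = q + 1 from by omega,
        show (4*q + 3 + 1) / 4 = q + 1 from by omega,
        show (4*q + 3) / 4 = q from by omega]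
      rw [xorRange_succ (fun i => g (3 + 4 * i)) q,
        show g (3 + 4 * q) = g (4 * q + 3) from by congr 1; omega]
      exact shape4 _ _ _ _ _

theorem cnt_nonneg (m j p : Int) (hm : 1 ≤ m) (hj : 0 ≤ j) (hjp : j < p) (hp : 0 < p) :
    0 ≤ PySem.Int.floordiv (m - j + p - 1) p := by
  rw [PySem.Int.floordiv_eq_ediv_of_pos hp]
  exact Int.ediv_nonneg (by omega) (by omega)

theorem xorPxAp_spec (a d m : Int) (hd : 1 ≤ d) (hm : 1 ≤ m) :
    xorPxAp a d m = xorRange (fun k => px (a + (k : Int) * d)) m.toNat := by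
  by_cases h2 : PySem.Int.mod d 2 ≠ 0
  · -- d odd, p = 4
    have hst : (4:Int) ∣ 4 * d := ⟨d, rfl⟩
    have hs : (0:Int) < 4 * d := by omega
    simp only [xorPxAp, if_pos h2]
    rw [show PySem.List.pyRange 0 4 1 = [0, 1, 2, 3] from rfl]
    simp only [List.foldl_cons, List.foldl_nil]
    rw [slot_eq _ _ _ _ hs hst (cnt_nonneg m 0 4 hm (by omega) (by omega) (by omega)),
        slot_eq _ _ _ _ hs hst (cnt_nonneg m 1 4 hm (by omega) (by omega) (by omega)),
        slot_eq _ _ _ _ hs hst (cnt_nonneg m 2 4 hm (by omega) (by omega) (by omega)),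
        slot_eq _ _ _ _ hs hst (cnt_nonneg m 3 4 hm (by omega) (by omega) (by omega)),
        bxor_zero_left]
    rw [part4 (fun k => px (a + (k : Int) * d)) m.toNat]
    rw [show (PySem.Int.floordiv (m - 0 + 4 - 1) 4).toNat = (m.toNat + 3) / 4 from by
          rw [PySem.Int.floordiv_eq_ediv_of_pos (by omega)]; omega,
        show (PySem.Int.floordiv (m - 1 + 4 - 1) 4).toNat = (m.toNat + 2) / 4 from by
          rw [PySem.Int.floordiv_eq_ediv_of_pos (by omega)]; omega,
        show (PySem.Int.floordiv (m - 2 + 4 - 1) 4).toNat = (m.toNat + 1) / 4 from by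
          rw [PySem.Int.floordiv_eq_ediv_of_pos (by omega)]; omega,
        show (PySem.Int.floordiv (m - 3 + 4 - 1) 4).toNat = m.toNat / 4 from by
          rw [PySem.Int.floordiv_eq_ediv_of_pos (by omega)]; omega]
    congr 1
    · congr 1
      · congr 1
        · refine xorRange_congr _ _ _ (fun k _ => ?_)
          congr 1
          push_cast
          ring
        · refine xorRange_congr _ _ _ (fun k _ => ?_)
          congr 1
          push_cast
          ring
      · refine xorRange_congr _ _ _ (fun k _ => ?_)
        congr 1
        push_cast
        ring
    · refine xorRange_congr _ _ _ (fun k _ => ?_)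
      congr 1
      push_cast
      ring
  · push_neg at h2
    by_cases h4 : PySem.Int.mod d 4 ≠ 0
    · -- d ≡ 2 (mod 4), p = 2
      have hd2 : d % 2 = 0 := by
        rw [← PySem.Int.mod_eq_emod_of_pos (by norm_num : (0:Int) < 2)]; exact h2
      have hd4 : ¬ d % 4 = 0 := by
        rw [← PySem.Int.mod_eq_emod_of_pos (by norm_num : (0:Int) < 4)]; exact h4
      have hst : (4:Int) ∣ 2 * d := by omega
      have hs : (0:Int) < 2 * d := by omega
      simp only [xorPxAp, if_neg (not_not_intro h2), if_pos h4]
      rw [show PySem.List.pyRange 0 2 1 = [0, 1] from rfl]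
      simp only [List.foldl_cons, List.foldl_nil]
      rw [slot_eq _ _ _ _ hs hst (cnt_nonneg m 0 2 hm (by omega) (by omega) (by omega)),
          slot_eq _ _ _ _ hs hst (cnt_nonneg m 1 2 hm (by omega) (by omega) (by omega)),
          bxor_zero_left]
      rw [part2 (fun k => px (a + (k : Int) * d)) m.toNat]
      rw [show (PySem.Int.floordiv (m - 0 + 2 - 1) 2).toNat = (m.toNat + 1) / 2 from by
            rw [PySem.Int.floordiv_eq_ediv_of_pos (by omega)]; omega,
          show (PySem.Int.floordiv (m - 1 + 2 - 1) 2).toNat = m.toNat / 2 from by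
            rw [PySem.Int.floordiv_eq_ediv_of_pos (by omega)]; omega]
      congr 1
      · refine xorRange_congr _ _ _ (fun k _ => ?_)
        congr 1
        push_cast
        ring
      · refine xorRange_congr _ _ _ (fun k _ => ?_)
        congr 1
        push_cast
        ring
    · -- d ≡ 0 (mod 4), p = 1
      push_neg at h4
      have hd4 : d % 4 = 0 := by
        rw [← PySem.Int.mod_eq_emod_of_pos (by norm_num : (0:Int) < 4)]; exact h4
      have hst : (4:Int) ∣ 1 * d := by omega
      have hs : (0:Int) < 1 * d := by omega
      simp only [xorPxAp, if_neg (not_not_intro h2), if_neg (not_not_intro h4)]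
      rw [show PySem.List.pyRange 0 1 1 = [0] from rfl]
      simp only [List.foldl_cons, List.foldl_nil]
      rw [slot_eq _ _ _ _ hs hst (cnt_nonneg m 0 1 hm (by omega) (by omega) (by omega)),
          bxor_zero_left]
      rw [show (PySem.Int.floordiv (m - 0 + 1 - 1) 1).toNat = m.toNat from by
            rw [PySem.Int.floordiv_eq_ediv_of_pos (by omega)]; omega]
      refine xorRange_congr _ _ _ (fun k _ => ?_)
      congr 1
      push_cast
      ring

theorem px_bxor_pred (s : Int) : PySem.Int.bxor (px s) (px (s - 1)) = s := by
  have hr0 : 0 ≤ PySem.Int.mod s 4 := PySem.Int.mod_nonneg s (by norm_num)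
  have hr4 : PySem.Int.mod s 4 < 4 := PySem.Int.mod_lt s (by norm_num)
  have hemod : PySem.Int.mod s 4 = s % 4 := PySem.Int.mod_eq_emod_of_pos (by norm_num)
  have hemod' : PySem.Int.mod (s - 1) 4 = (s - 1) % 4 := PySem.Int.mod_eq_emod_of_pos (by norm_num)
  unfold px
  interval_cases h : PySem.Int.mod s 4
  · rw [show PySem.Int.mod (s - 1) 4 = 3 from by omega]
    norm_num
  · rw [show PySem.Int.mod (s - 1) 4 = 0 from by omega]
    norm_num
    rw [PySem.Int.bxor_comm, bxor_one_even (s - 1) (by omega)]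
    ring
  · rw [show PySem.Int.mod (s - 1) 4 = 1 from by omega]
    norm_num
    rw [bxor_one_odd (s + 1) (by omega)]
    ring
  · rw [show PySem.Int.mod (s - 1) 4 = 2 from by omega]
    norm_num
    exact bxor_zero_left s

theorem main_eq (start length : Int) : altSolution start length = altSolution_alt start length := by
  unfold altSolution altSolution_alt
  rcases le_or_gt length 0 with hle | hpos
  · rw [altLoopA, if_neg (by omega), if_pos hle]
  · rw [if_neg (by omega)]
    obtain ⟨mN, rfl⟩ : ∃ mN : Nat, length = (mN : Int) := ⟨length.toNat, by omega⟩
    rw [altLoopA_spec mN (mN : Int) start 0 0, bxor_zero_left]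
    by_cases h1 : (mN : Int) = 1
    · rw [if_pos h1]
      have hm1 : mN = 1 := by omega
      subst hm1
      rw [show (1 : Nat) = 0 + 1 from rfl, xorRange_succ]
      simp only [xorRange, List.range_zero, List.foldl_nil]
      rw [bxor_zero_left]
      refine Prod.ext ?_ (by simp)
      show PySem.Int.bxor (px _) (px _) = start
      rw [show start + (0:Nat) * ((0+1 : Nat) : Int) + (((0+1 : Nat) : Int) - 1 - (0:Nat)) = start from by push_cast; ring,
        show start + (0:Nat) * ((0+1 : Nat) : Int) - 1 = start - 1 from by push_cast; ring]
      exact px_bxor_pred start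
    · rw [if_neg h1]
      have hm2 : 2 ≤ (mN : Int) := by omega
      rw [xorPxAp_spec _ _ _ (by omega) (by omega), xorPxAp_spec _ _ _ (by omega) (by omega)]
      refine Prod.ext ?_ (by simp)
      simp only [Int.toNat_natCast]
      rw [xorRange_bxor_split]
      congr 1
      · refine xorRange_congr _ _ _ (fun k _ => ?_)
        congr 1
        push_cast
        ring
      · refine xorRange_congr _ _ _ (fun k _ => ?_)
        congr 1
        push_cast
        ring

-- ===== VERDICT (by name: the statement is the Claim_ definition above) =====
theorem altSolution_spec : Claim_equal_altSolution := by
  intro start length _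
  unfold Spec_altSolution
  exact main_eq start length
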